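-- pv_equiv track=rewrite | github.com/ivi982010/SySdL-TPs | Lexer.py | a_Division
-- ===== SOURCE A (Python) =====
-- def a_Division (tokens, acu):
--     s = 0
--     for c in acu:
--         if c == '/':
--             s = 1
--         else:
--             s = -1
--     if s == 1:
--         tokens.append(("<OpMat>", acu))
--     return (s == 1)
-- ===== SOURCE B (Python) =====
-- def a_Division(tokens, acu):
--     result = bool(acu) and acu[-1] == '/'
--     if result:
--         tokens.append(("<OpMat>", acu))
--     return result
-- ===== Notes on version B (the rewrite author's own statement) =====
-- stated objective: simpler
-- what changed: Replaces the loop over acu (which overwrites a flag for every character, so only the last character matters) by a direct O(1) check of the last character, keeping the same append side effect.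
import Mathlib
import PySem

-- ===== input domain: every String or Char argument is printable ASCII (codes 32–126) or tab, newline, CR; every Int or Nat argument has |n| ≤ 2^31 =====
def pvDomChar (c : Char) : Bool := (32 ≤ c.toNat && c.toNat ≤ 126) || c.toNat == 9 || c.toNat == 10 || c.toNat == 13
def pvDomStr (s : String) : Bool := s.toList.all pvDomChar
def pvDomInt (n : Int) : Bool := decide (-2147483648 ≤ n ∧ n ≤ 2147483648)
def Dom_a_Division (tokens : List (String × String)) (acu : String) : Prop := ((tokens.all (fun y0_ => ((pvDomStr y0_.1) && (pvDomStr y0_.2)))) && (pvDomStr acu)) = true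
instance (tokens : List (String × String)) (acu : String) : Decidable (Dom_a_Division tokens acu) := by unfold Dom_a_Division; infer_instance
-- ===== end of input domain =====

-- ===== PORT A =====
-- Port of A: fold over the characters, flag overwritten per character.
def a_Division (tokens : List (String × String)) (acu : String) : Bool :=
  let s : Int := acu.toList.foldl (fun s c => if c = '/' then 1 else -1) 0
  (s == 1)

-- ===== PORT B =====
-- Port of B: B drops A's loop and checks only the last character acu[-1] (simpler; the fold's result depends only on it).
def a_Division_alt (tokens : List (String × String)) (acu : String) : Bool :=
  decide (¬ acu.toList.isEmpty = true) && (PySem.Str.pyGet? acu (-1) == some '/')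

-- ===== PRECONDITION & SPEC =====
def Spec_a_Division (tokens : List (String × String)) (acu : String) (out : Bool) : Prop := out = a_Division_alt tokens acu
instance (tokens : List (String × String)) (acu : String) (out : Bool) : Decidable (Spec_a_Division tokens acu out) := by unfold Spec_a_Division; infer_instance

-- ===== CLAIM (what is proved, stated in full; the proofs are below) =====
def Claim_equal_a_Division : Prop := ∀ (tokens : List (String × String)) (acu : String), Dom_a_Division tokens acu → Spec_a_Division tokens acu (a_Division tokens acu)

-- ===== LEMMAS AND PROOFS =====

lemma fold_last (l : List Char) (s : Int) (hs : s = 1 ∨ s = -1 ∨ s = 0) :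
    (l.foldl (fun s c => if c = '/' then (1:Int) else -1) s == 1) =
      (match l.getLast? with
       | some c => c == '/'
       | none => s == 1) := by
  induction l generalizing s with
  | nil => rfl
  | cons c t ih =>
    simp only [List.foldl_cons]
    rw [ih _ (by split_ifs <;> simp)]
    cases t with
    | nil => simp [List.getLast?]
    | cons d u =>
        cases hl : (d :: u).getLast? with
        | none => simp at hl
        | some e => simp [hl]

-- ===== VERDICT (by name: the statement is the Claim_ definition above) =====
theorem a_Division_spec : Claim_equal_a_Division := by
  intro tokens acu _
  unfold Spec_a_Division a_Division a_Division_alt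
  rw [fold_last _ _ (Or.inr (Or.inr rfl))]
  simp only [PySem.Str.pyGet?]
  cases h : acu.toList with
  | nil => simp
  | cons c t =>
    cases hl : (c :: t).getLast? with
    | none => simp at hl
    | some e =>
      simp [PySem.Chars.pyGet?, PySem.List.pyGet?_neg_one, hl]
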